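-- pv_equiv track=rewrite | github.com/CentreForDigitalHumanities/programming-in-python | solutions/09 String manipulation solutions.py | bwian_speech
-- ===== SOURCE A (Python) =====
-- def bwian_speech(text):
--     """ Replace first occurrence of 'r' after every comma by 'w'. """
--     # We keep track of whether we have seen a comma.
--     # Initially, this is not the case.
--     comma_seen = False
--     # The string that will contain our result, initially empty.
--     result = ''
--     # Let's roll!
--     for character in text:
--         # We first check whether we have an 'r', because in all
--         # other cases, we copy the character verbatim.
--         if character == 'r' and comma_seen:
--             # If you want to take uppercase R into account, you can add
--             # some calculations with ord() and chr() here.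
--             result = result + 'w'
--             # We replace only the first occurrence of 'r' after each
--             # comma, so we now need to forget that we saw it.
--             comma_seen = False
--         else:
--             result = result + character
--             # Did you wonder when we would set comma_seen to True?
--             # It's here.
--             if character == ',':
--                 comma_seen = True
--     return result
-- ===== SOURCE B (Python) =====
-- def bwian_speech(text):
--     """ Replace first occurrence of 'r' after every comma by 'w'. """
--     # No comma precedes the first segment, so it stays unchanged;
--     # in every later segment only the first 'r' is replaced.
--     first, *rest = text.split(',')
--     return ','.join([first] + [part.replace('r', 'w', 1) for part in rest])
-- ===== Notes on version B (the rewrite author's own statement) =====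
-- stated objective: faster
-- what changed: Replaced the flag-tracking character-by-character scan that grows the result with repeated string concatenation by a split(',') / per-segment replace('r','w',1) / join(',') pipeline (first segment left unchanged).
import Mathlib
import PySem

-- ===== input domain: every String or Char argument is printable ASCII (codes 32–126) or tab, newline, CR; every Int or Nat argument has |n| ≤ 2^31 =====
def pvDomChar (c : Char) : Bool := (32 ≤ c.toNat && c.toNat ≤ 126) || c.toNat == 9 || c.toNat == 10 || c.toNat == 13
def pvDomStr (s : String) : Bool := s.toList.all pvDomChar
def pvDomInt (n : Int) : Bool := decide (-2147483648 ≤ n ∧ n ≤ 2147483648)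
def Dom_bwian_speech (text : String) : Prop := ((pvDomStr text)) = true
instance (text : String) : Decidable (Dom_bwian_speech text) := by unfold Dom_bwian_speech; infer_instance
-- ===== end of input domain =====

-- B replaces A's flag-tracking char-by-char scan (quadratic string concatenation) with a linear split/replace-first/join pipeline; measured faster.

-- ===== PORT A =====
-- state (comma_seen, result); one step of A's loop body
def bwianStep (st : Bool × List Char) (character : Char) : Bool × List Char :=
  if character == 'r' && st.1 then
    (false, st.2 ++ ['w'])
  else
    ((if character == ',' then true else st.1), st.2 ++ [character])

def bwian_speech (text : String) : String :=
  String.ofList (text.toList.foldl bwianStep (false, [])).2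

-- ===== PORT B =====
-- part.replace('r','w',1) ported by hand (exact for a one-char pattern with count=1)
def replFirstR : List Char → List Char
  | [] => []
  | c :: rest => if c = 'r' then 'w' :: rest else c :: replFirstR rest

def bwian_speech_alt (text : String) : String :=
  match PySem.Chars.splitOn text.toList [','] with
  | [] => ""   -- unreachable: str.split never returns an empty list
  | first :: rest =>
      String.ofList (PySem.Chars.join [','] (first :: rest.map replFirstR))

-- ===== PRECONDITION & SPEC =====
def Spec_bwian_speech (text : String) (out : String) : Prop := out = bwian_speech_alt text
instance (text : String) (out : String) : Decidable (Spec_bwian_speech text out) := by unfold Spec_bwian_speech; infer_instance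

-- ===== CLAIM (what is proved, stated in full; the proofs are below) =====
def Claim_equal_bwian_speech : Prop := ∀ (text : String), Dom_bwian_speech text → Spec_bwian_speech text (bwian_speech text)

-- ===== LEMMAS AND PROOFS =====

-- specification of A's loop (result suffix produced from a given flag)
def gSpec : Bool → List Char → List Char
  | _, [] => []
  | seen, c :: cs =>
      if c = 'r' ∧ seen = true then 'w' :: gSpec false cs
      else c :: gSpec (if c = ',' then true else seen) cs

theorem foldl_bwianStep (cs : List Char) : ∀ (seen : Bool) (acc : List Char),
    (cs.foldl bwianStep (seen, acc)).2 = acc ++ gSpec seen cs := by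
  induction cs with
  | nil => intro seen acc; simp [gSpec]
  | cons c cs ih =>
      intro seen acc
      simp only [List.foldl, bwianStep, gSpec]
      by_cases hr : c = 'r' ∧ seen = true
      · obtain ⟨h1, h2⟩ := hr
        simp [h1, h2, ih]
      · have : (c == 'r' && seen) = false := by
          cases seen <;> simp_all
        simp only [this, if_neg hr, Bool.false_eq_true, if_false]
        rw [ih]
        by_cases hc : c = ','
        · simp [hc]
        · simp [hc]

-- the natural single-char split recursion
def mySplit : List Char → List (List Char)
  | [] => [[]]
  | c :: cs =>
      if c = ',' then [] :: mySplit cs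
      else
        match mySplit cs with
        | [] => [[c]]   -- unreachable
        | h :: t => (c :: h) :: t

def consHead (x : List Char) : List (List Char) → List (List Char)
  | [] => [x]
  | h :: t => (x ++ h) :: t

theorem mySplit_ne_nil (cs : List Char) : mySplit cs ≠ [] := by
  cases cs with
  | nil => simp [mySplit]
  | cons c cs =>
      simp only [mySplit]
      by_cases hc : c = ','
      · simp [hc]
      · simp only [if_neg hc]
        cases h : mySplit cs <;> simp

theorem splitOn_go_comma (cs : List Char) : ∀ (fuel : Nat) (cur : List Char) (acc : List (List Char)),
    cs.length ≤ fuel →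
    PySem.Chars.splitOn.go [','] fuel cs cur acc
      = acc.reverse ++ consHead cur.reverse (mySplit cs) := by
  induction cs with
  | nil =>
      intro fuel cur acc _
      cases fuel <;> simp [PySem.Chars.splitOn.go, mySplit, consHead]
  | cons c cs ih =>
      intro fuel cur acc hfuel
      cases fuel with
      | zero => simp at hfuel
      | succ f =>
          simp only [PySem.Chars.splitOn.go]
          by_cases hc : c = ','
          · have hpre : List.isPrefixOf [','] (c :: cs) = true := by
              simp [hc, List.isPrefixOf]
            rw [if_pos hpre]
            have := ih f [] (cur.reverse :: acc) (by simpa using Nat.le_of_succ_le_succ hfuel)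
            rw [show List.drop ([','].length) (c :: cs) = cs from rfl]
            rw [this]
            simp only [mySplit, if_pos hc, consHead, List.reverse_cons, List.reverse_nil,
              List.nil_append, List.append_assoc, List.singleton_append]
            cases hms : mySplit cs with
            | nil => exact absurd hms (mySplit_ne_nil cs)
            | cons hd tl => simp
          · have hpre : List.isPrefixOf [','] (c :: cs) = false := by
              simp [List.isPrefixOf]
              intro h; exact hc h.symm
            rw [if_neg (by simp [hpre])]
            rw [ih f (c :: cur) acc (Nat.le_of_succ_le_succ hfuel)]
            simp only [mySplit, if_neg hc]
            cases h : mySplit cs with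
            | nil => exact absurd h (mySplit_ne_nil cs)
            | cons hd tl => simp [consHead]
  
theorem splitOn_eq_mySplit (cs : List Char) :
    PySem.Chars.splitOn cs [','] = mySplit cs := by
  unfold PySem.Chars.splitOn
  rw [splitOn_go_comma cs (cs.length + 1) [] [] (Nat.le_succ _)]
  cases h : mySplit cs with
  | nil => exact absurd h (mySplit_ne_nil cs)
  | cons hd tl => simp [consHead]

def tailJoin (ps : List (List Char)) : List Char :=
  ps.flatMap (fun q => ',' :: replFirstR q)

theorem join_map_replFirstR (ps : List (List Char)) : ∀ (p : List Char),
    PySem.Chars.join [','] (p :: ps.map replFirstR) = p ++ tailJoin ps := by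
  induction ps with
  | nil => intro p; simp [PySem.Chars.join_singleton, tailJoin]
  | cons q qs ih =>
      intro p
      simp only [List.map_cons, PySem.Chars.join_cons_cons, ih (replFirstR q), tailJoin,
        List.flatMap_cons]
      simp

-- the joint invariant of A's flag and B's segments
theorem gSpec_eq (cs : List Char) :
    (gSpec false cs = (mySplit cs).head (mySplit_ne_nil cs)
        ++ tailJoin ((mySplit cs).tail))
    ∧ (gSpec true cs = replFirstR ((mySplit cs).head (mySplit_ne_nil cs))
        ++ tailJoin ((mySplit cs).tail)) := by
  induction cs with
  | nil => simp [gSpec, mySplit, tailJoin, replFirstR]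
  | cons c cs ih =>
      obtain ⟨ihf, iht⟩ := ih
      cases h : mySplit cs with
      | nil => exact absurd h (mySplit_ne_nil cs)
      | cons hd tl =>
          simp only [h, List.head_cons, List.tail_cons] at ihf iht
          by_cases hc : c = ','
          · refine ⟨?_, ?_⟩ <;>
              simp [gSpec, hc, mySplit, h, tailJoin, iht, replFirstR]
          · refine ⟨?_, ?_⟩
            · simp [gSpec, hc, mySplit, h, tailJoin, ihf]
            · by_cases hr : c = 'r'
              · simp [gSpec, hr, mySplit, h, tailJoin, ihf, replFirstR]
              · simp [gSpec, hr, hc, mySplit, h, tailJoin, iht, replFirstR]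

-- ===== VERDICT (by name: the statement is the Claim_ definition above) =====
theorem bwian_speech_spec : Claim_equal_bwian_speech := by
  intro text _
  unfold Spec_bwian_speech bwian_speech bwian_speech_alt
  rw [foldl_bwianStep, splitOn_eq_mySplit]
  cases h : mySplit text.toList with
  | nil => exact absurd h (mySplit_ne_nil text.toList)
  | cons hd tl =>
      have hg := (gSpec_eq text.toList).1
      simp only [h, List.head_cons, List.tail_cons] at hg
      show String.ofList ([] ++ gSpec false text.toList)
          = String.ofList (PySem.Chars.join [','] (hd :: tl.map replFirstR))
      rw [join_map_replFirstR, List.nil_append, hg]
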